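-- pv_equiv track=rewrite | github.com/JosephNK/jkit-code-plugin | scripts/flutter/setup/flutter_ios_info_plist_setup.py | patch_info_plist
-- ===== SOURCE A (Python) =====
-- URL_TYPES_BLOCK = """\t<key>CFBundleURLTypes</key>
-- \t<array>
-- \t\t<dict>
-- \t\t\t<key>CFBundleTypeRole</key>
-- \t\t\t<string>Editor</string>
-- \t\t\t<key>CFBundleURLSchemes</key>
-- \t\t\t<array>
-- \t\t\t\t<string>$(APP_URL_SCHEMES)</string>
-- \t\t\t</array>
-- \t\t</dict>
-- \t</array>"""
--
-- def patch_info_plist(content: str) -> str: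
--     """기존 Info.plist에 필요한 설정을 패치
--
--     각 패치는 이미 적용되어 있으면 건너뜁니다 (멱등성 보장).
--     """
--     # 1. CFBundleDisplayName → $(APP_DISPLAY_NAME)
--     if "$(APP_DISPLAY_NAME)" not in content:
--         # 기존 CFBundleDisplayName 값을 빌드 변수로 변경
--         if "<key>CFBundleDisplayName</key>" in content:
--             # 기존 키가 있으면 값만 변경
--             lines = content.split("\n")
--             new_lines = []
--             i = 0
--             while i < len(lines):
--                 new_lines.append(lines[i])
--                 if "<key>CFBundleDisplayName</key>" in lines[i]:
--                     # 다음 줄의 <string> 값을 교체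
--                     i += 1
--                     if i < len(lines):
--                         indent = lines[i][: len(lines[i]) - len(lines[i].lstrip())]
--                         new_lines.append(
--                             f"{indent}<string>$(APP_DISPLAY_NAME)</string>"
--                         )
--                 i += 1
--             content = "\n".join(new_lines)
--         else:
--             # CFBundleDisplayName 키가 없으면 CFBundleDevelopmentRegion 다음에 추가
--             content = content.replace(
--                 "\t<key>CFBundleExecutable</key>",
--                 "\t<key>CFBundleDisplayName</key>\n"
--                 "\t<string>$(APP_DISPLAY_NAME)</string>\n"
--                 "\t<key>CFBundleExecutable</key>",
--             )
--
--     # 2. CFBundleURLTypes 블록 추가 (Deep link URL scheme)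
--     if "CFBundleURLTypes" not in content:
--         # </dict> 바로 앞에 삽입
--         last_dict_close = content.rfind("</dict>")
--         if last_dict_close != -1:
--             content = (
--                 content[:last_dict_close]
--                 + URL_TYPES_BLOCK
--                 + "\n"
--                 + content[last_dict_close:]
--             )
--
--     return content
-- ===== SOURCE B (Python) =====
-- import re
--
-- URL_TYPES_BLOCK = """\t<key>CFBundleURLTypes</key>
-- \t<array>
-- \t\t<dict>
-- \t\t\t<key>CFBundleTypeRole</key>
-- \t\t\t<string>Editor</string>
-- \t\t\t<key>CFBundleURLSchemes</key>
-- \t\t\t<array>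
-- \t\t\t\t<string>$(APP_URL_SCHEMES)</string>
-- \t\t\t</array>
-- \t\t</dict>
-- \t</array>"""
--
-- # One regex substitution instead of the manual line loop: match a line containing
-- # <key>CFBundleDisplayName</key> through its newline, then replace the entire next
-- # line by its own leading whitespace plus <string>$(APP_DISPLAY_NAME)</string>.
-- _DISPLAY_NAME_RE = re.compile(
--     r"(<key>CFBundleDisplayName</key>[^\n]*\n)([ \t\v\f\r]*)[^\n]*"
-- )
--
--
-- def patch_info_plist(content: str) -> str:
--     # 1. CFBundleDisplayName -> $(APP_DISPLAY_NAME)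
--     if "$(APP_DISPLAY_NAME)" not in content:
--         if "<key>CFBundleDisplayName</key>" in content:
--             content = _DISPLAY_NAME_RE.sub(
--                 lambda m: m.group(1)
--                 + m.group(2)
--                 + "<string>$(APP_DISPLAY_NAME)</string>",
--                 content,
--             )
--         else:
--             content = content.replace(
--                 "\t<key>CFBundleExecutable</key>",
--                 "\t<key>CFBundleDisplayName</key>\n"
--                 "\t<string>$(APP_DISPLAY_NAME)</string>\n"
--                 "\t<key>CFBundleExecutable</key>",
--             )
--
--     # 2. CFBundleURLTypes block (unchanged)
--     if "CFBundleURLTypes" not in content: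
--         last_dict_close = content.rfind("</dict>")
--         if last_dict_close != -1:
--             content = (
--                 content[:last_dict_close]
--                 + URL_TYPES_BLOCK
--                 + "\n"
--                 + content[last_dict_close:]
--             )
--
--     return content
-- ===== Notes on version B (the rewrite author's own statement) =====
-- stated objective: idiomatic
-- what changed: Step 1's manual split-into-lines/index-while loop that rewrites the line after each CFBundleDisplayName key is replaced by a single precompiled re.sub whose pattern matches the key line through its line break plus the entire next line and substitutes that line's own indentation followed by the display-name string element; the idempotency guards and the closing-dict splice of step 2 are unchanged.
import Mathlib
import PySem

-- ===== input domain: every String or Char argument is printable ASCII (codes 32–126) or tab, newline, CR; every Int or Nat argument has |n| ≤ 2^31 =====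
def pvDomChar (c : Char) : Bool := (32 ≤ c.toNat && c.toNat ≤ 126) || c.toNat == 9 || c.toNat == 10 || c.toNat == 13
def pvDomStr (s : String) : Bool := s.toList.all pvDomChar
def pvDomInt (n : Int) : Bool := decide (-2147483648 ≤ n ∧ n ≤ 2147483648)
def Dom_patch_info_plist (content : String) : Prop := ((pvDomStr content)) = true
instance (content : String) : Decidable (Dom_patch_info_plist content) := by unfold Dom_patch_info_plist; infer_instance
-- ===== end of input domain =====

-- B replaces A's manual index loop over split lines by a single left-to-right
-- substitution scan (Python: one re.sub); same output; objective: idiomatic.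

-- shared module-level string constants (same literals in both Pythons)
def keyC : List Char := "<key>CFBundleDisplayName</key>".toList
def dnC : List Char := "$(APP_DISPLAY_NAME)".toList
def strC : List Char := "<string>$(APP_DISPLAY_NAME)</string>".toList
def exeC : List Char := "\t<key>CFBundleExecutable</key>".toList
def insC : List Char := "\t<key>CFBundleDisplayName</key>\n\t<string>$(APP_DISPLAY_NAME)</string>\n\t<key>CFBundleExecutable</key>".toList
def urlTypesC : List Char := "CFBundleURLTypes".toList
def dictCloseC : List Char := "</dict>".toList
def urlBlockC : List Char := "\t<key>CFBundleURLTypes</key>\n\t<array>\n\t\t<dict>\n\t\t\t<key>CFBundleTypeRole</key>\n\t\t\t<string>Editor</string>\n\t\t\t<key>CFBundleURLSchemes</key>\n\t\t\t<array>\n\t\t\t\t<string>$(APP_URL_SCHEMES)</string>\n\t\t\t</array>\n\t\t</dict>\n\t</array>".toList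

-- ===== PORT A =====

-- indent = lines[i][: len(lines[i]) - len(lines[i].lstrip())]
def aIndent (l : List Char) : List Char :=
  PySem.List.slice l none (some ((l.length : Int) - ((PySem.Chars.lstrip l).length : Int)))

-- the while-loop over lines: append lines[i]; if it contains the key, also
-- consume the next line and append indent + "<string>$(APP_DISPLAY_NAME)</string>"
def aLoop : List (List Char) → List (List Char)
  | [] => []
  | l :: rest =>
    if PySem.Chars.isIn keyC l then
      l :: (match rest with
            | [] => []
            | n :: rest' => (aIndent n ++ strC) :: aLoop rest')
    else l :: aLoop rest

-- step 1 of A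
def aStep1 (s : List Char) : List Char :=
  if PySem.Chars.isIn dnC s = false then
    if PySem.Chars.isIn keyC s then
      PySem.Chars.join ['\n'] (aLoop (PySem.Chars.splitOn s ['\n']))
    else PySem.Chars.replace s exeC insC
  else s

-- step 2 of A: insert URL_TYPES_BLOCK before the last "</dict>"
def aStep2 (s : List Char) : List Char :=
  if PySem.Chars.isIn urlTypesC s = false then
    let last := PySem.Chars.rfind s dictCloseC
    if last ≠ -1 then
      PySem.List.slice s none (some last) ++ urlBlockC ++ ['\n'] ++ PySem.List.slice s (some last) none
    else s
  else s

def patch_info_plist (content : String) : String :=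
  String.ofList (aStep2 (aStep1 content.toList))

-- ===== PORT B =====

-- hand port of B's compiled regex substitution
--   (<key>CFBundleDisplayName</key>[^\n]*\n)([ \t\v\f\r]*)[^\n]*  ->  \1\2<string>$(APP_DISPLAY_NAME)</string>
-- as a left-to-right scan (leftmost match, continue after the match); exact on Dom
-- (on Dom the class [ \t\v\f\r] is exactly "whitespace other than '\n'").
def wsP (c : Char) : Bool := PySem.Chars.isspace c && !(c == '\n')

mutual
  -- look for the next occurrence of the key
  def bScan : List Char → List Char
    | [] => []
    | c :: t => if keyC.isPrefixOf (c :: t) then bCopyLine (c :: t) else c :: bScan t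
  termination_by s => 3 * s.length + 1
  decreasing_by all_goals simp
  -- key found: emit the rest of its line including the '\n' (group 1)
  def bCopyLine : List Char → List Char
    | [] => []
    | c :: t => if c == '\n' then c :: bReplNext t else c :: bCopyLine t
  termination_by s => 3 * s.length
  decreasing_by
    · simp; omega
    · simp
  -- emit the next line's indent (group 2) + the <string> element, skip the rest
  -- of that line, and continue scanning at its terminating '\n' (match end)
  def bReplNext (t : List Char) : List Char :=
    t.takeWhile wsP ++ strC ++ bScan (t.dropWhile (fun c => !(c == '\n')))
  termination_by 3 * t.length + 2
  decreasing_by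
    have := List.length_dropWhile_le (fun c => !(c == '\n')) t
    omega
end

-- step 1 of B
def bStep1 (s : List Char) : List Char :=
  if PySem.Chars.isIn dnC s = false then
    if PySem.Chars.isIn keyC s then bScan s
    else PySem.Chars.replace s exeC insC
  else s

-- step 2 of B (same code as in A's Python)
def bStep2 (s : List Char) : List Char :=
  if PySem.Chars.isIn urlTypesC s = false then
    let last := PySem.Chars.rfind s dictCloseC
    if last ≠ -1 then
      PySem.List.slice s none (some last) ++ urlBlockC ++ ['\n'] ++ PySem.List.slice s (some last) none
    else s
  else s

def patch_info_plist_alt (content : String) : String :=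
  String.ofList (bStep2 (bStep1 content.toList))

-- ===== PRECONDITION & SPEC =====
def Spec_patch_info_plist (content : String) (out : String) : Prop := out = patch_info_plist_alt content
instance (content : String) (out : String) : Decidable (Spec_patch_info_plist content out) := by unfold Spec_patch_info_plist; infer_instance

-- ===== CLAIM (what is proved, stated in full; the proofs are below) =====
def Claim_equal_patch_info_plist : Prop := ∀ (content : String), Dom_patch_info_plist content → Spec_patch_info_plist content (patch_info_plist content)

-- ===== LEMMAS AND PROOFS =====

-- structural characterisation of split("\n")
def pvSplit : List Char → List (List Char)
  | [] => [[]]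
  | c :: t => if c = '\n' then [] :: pvSplit t else (pvSplit t).modifyHead (c :: ·)

theorem pvSplit_ne_nil (s : List Char) : pvSplit s ≠ [] := by
  cases s with
  | nil => simp [pvSplit]
  | cons c t =>
    simp only [pvSplit]
    split
    · simp
    · rcases h : pvSplit t with _ | ⟨a, l⟩
      · exact absurd h (pvSplit_ne_nil t)
      · simp

theorem splitOn_go_eq (fuel : Nat) :
    ∀ (l cur : List Char) (acc : List (List Char)), l.length < fuel →
      PySem.Chars.splitOn.go ['\n'] fuel l cur acc
        = acc.reverse ++ (pvSplit l).modifyHead (cur.reverse ++ ·) := by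
  induction fuel with
  | zero => intro l cur acc h; omega
  | succ f ih =>
    intro l cur acc h
    cases l with
    | nil =>
      rw [PySem.Chars.splitOn.go.eq_2 _ _ _ _ (by omega)]
      simp [pvSplit]
    | cons c t =>
      show PySem.Chars.splitOn.go ['\n'] (Nat.succ f) (c :: t) cur acc = _
      rw [PySem.Chars.splitOn.go.eq_3]
      have hpre : (['\n'].isPrefixOf (c :: t)) = ('\n' == c) := by
        simp [List.isPrefixOf]
      rw [hpre]
      by_cases hc : c = '\n'
      · subst hc
        rw [if_pos (by simp)]
        have hdrop : List.drop (['\n'] : List Char).length ('\n' :: t) = t := by simp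
        rw [hdrop, ih t [] (cur.reverse :: acc) (by simp at h; omega)]
        rw [show pvSplit ('\n' :: t) = [] :: pvSplit t from by rw [pvSplit.eq_2, if_pos rfl]]
        rcases pvSplit t with _ | ⟨a, lst⟩ <;> simp
      · rw [if_neg (by simp only [beq_iff_eq]; exact fun he => hc he.symm)]
        rw [ih t (c :: cur) acc (by simp at h; omega)]
        rw [show pvSplit (c :: t) = (pvSplit t).modifyHead (c :: ·) from by rw [pvSplit.eq_2, if_neg hc]]
        rcases hsp : pvSplit t with _ | ⟨a, lst⟩
        · exact absurd hsp (pvSplit_ne_nil t)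
        · simp [List.modifyHead]

theorem splitOn_nl (s : List Char) : PySem.Chars.splitOn s ['\n'] = pvSplit s := by
  show PySem.Chars.splitOn.go ['\n'] (s.length + 1) s [] [] = pvSplit s
  rw [splitOn_go_eq (s.length + 1) s [] [] (by omega)]
  rcases hsp : pvSplit s with _ | ⟨a, lst⟩
  · exact absurd hsp (pvSplit_ne_nil s)
  · simp [List.modifyHead]

theorem join_pvSplit (s : List Char) : PySem.Chars.join ['\n'] (pvSplit s) = s := by
  induction s with
  | nil => simp [pvSplit, PySem.Chars.join_singleton]
  | cons c t ih =>
    rcases hsp : pvSplit t with _ | ⟨a, lst⟩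
    · exact absurd hsp (pvSplit_ne_nil t)
    · by_cases hc : c = '\n'
      · subst hc
        rw [show pvSplit ('\n' :: t) = [] :: pvSplit t from by rw [pvSplit.eq_2, if_pos rfl]]
        rw [hsp, PySem.Chars.join_cons_cons, ← hsp, ih]
        simp
      · rw [show pvSplit (c :: t) = (pvSplit t).modifyHead (c :: ·) from by rw [pvSplit.eq_2, if_neg hc]]
        rw [hsp]
        simp only [List.modifyHead]
        cases lst with
        | nil =>
          rw [PySem.Chars.join_singleton]
          rw [hsp, PySem.Chars.join_singleton] at ih
          simp [ih]
        | cons b lst' =>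
          rw [PySem.Chars.join_cons_cons]
          rw [hsp, PySem.Chars.join_cons_cons] at ih
          simp only [List.cons_append, List.append_assoc, List.nil_append] at ih ⊢
          simpa using ih

theorem pvSplit_no_nl (s : List Char) : ∀ l ∈ pvSplit s, '\n' ∉ l := by
  induction s with
  | nil => simp [pvSplit]
  | cons c t ih =>
    by_cases hc : c = '\n'
    · subst hc
      rw [show pvSplit ('\n' :: t) = [] :: pvSplit t from by rw [pvSplit.eq_2, if_pos rfl]]
      simpa using ih
    · rw [show pvSplit (c :: t) = (pvSplit t).modifyHead (c :: ·) from by rw [pvSplit.eq_2, if_neg hc]]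
      rcases hsp : pvSplit t with _ | ⟨a, lst⟩
      · exact absurd hsp (pvSplit_ne_nil t)
      · rw [hsp] at ih
        intro l hl
        simp only [List.modifyHead, List.mem_cons] at hl
        rcases hl with h | h
        · subst h
          intro hmem
          rcases List.mem_cons.mp hmem with h | h
          · exact hc h.symm
          · exact ih a (by simp) h
        · exact ih l (by simp [h])

-- key facts
theorem keyC_ne_nil : keyC ≠ [] := by decide
theorem nl_not_mem_keyC : '\n' ∉ keyC := by decide
theorem keyC_head : keyC = '<' :: "key>CFBundleDisplayName</key>".toList := by decide

-- a '\n'-free pattern that is a prefix of l ++ '\n' :: R is a prefix of l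
theorem prefix_of_append_nl {key l R : List Char} (hk : '\n' ∉ key)
    (h : key <+: (l ++ '\n' :: R)) : key <+: l := by
  rcases le_or_gt key.length l.length with hle | hlt
  · have := List.prefix_iff_eq_take.mp h
    rw [List.take_append_of_le_length hle] at this
    exact List.prefix_iff_eq_take.mpr this
  · exfalso
    have heq := List.prefix_iff_eq_take.mp h
    have hlen : l.length < (l ++ '\n' :: R).length := by simp
    have hidx : (l ++ '\n' :: R)[l.length]'hlen = '\n' := by simp
    have hmem : '\n' ∈ key := by
      rw [heq]
      have h2 : l.length < (List.take key.length (l ++ '\n' :: R)).length := by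
        simp [List.length_take]
        omega
      have h3 : (List.take key.length (l ++ '\n' :: R))[l.length]'h2 = '\n' := by
        rw [List.getElem_take]; exact hidx
      have hm := List.getElem_mem h2
      rwa [h3] at hm
    exact hk hmem

theorem bCopyLine_no_nl {l : List Char} (h : '\n' ∉ l) : bCopyLine l = l := by
  induction l with
  | nil => rw [bCopyLine.eq_def]
  | cons c t ih =>
    have hc : (c == '\n') = false := by
      simp only [beq_eq_false_iff_ne, ne_eq]
      intro he; exact h (by simp [he])
    rw [bCopyLine.eq_def]
    simp only [hc, Bool.false_eq_true, if_false]
    rw [ih (fun hm => h (by simp [hm]))]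

theorem bScan_cons (c : Char) (t : List Char) :
    bScan (c :: t) = if keyC.isPrefixOf (c :: t) then bCopyLine (c :: t) else c :: bScan t := by
  rw [bScan.eq_def]

theorem bCopyLine_cons (c : Char) (t : List Char) :
    bCopyLine (c :: t) = if c == '\n' then c :: bReplNext t else c :: bCopyLine t := by
  rw [bCopyLine.eq_def]

theorem bScan_no_nl {l : List Char} (h : '\n' ∉ l) : bScan l = l := by
  induction l with
  | nil => rw [bScan.eq_def]
  | cons c t ih =>
    rw [bScan_cons]
    by_cases hp : keyC.isPrefixOf (c :: t) = true
    · rw [if_pos hp]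
      exact bCopyLine_no_nl h
    · rw [if_neg hp, ih (fun hm => h (by simp [hm]))]

theorem bCopyLine_append_nl {l : List Char} (R : List Char) (h : '\n' ∉ l) :
    bCopyLine (l ++ '\n' :: R) = l ++ '\n' :: bReplNext R := by
  induction l with
  | nil => rw [List.nil_append, bCopyLine.eq_def]; simp
  | cons c t ih =>
    have hc : (c == '\n') = false := by
      simp only [beq_eq_false_iff_ne, ne_eq]
      intro he; exact h (by simp [he])
    rw [List.cons_append, bCopyLine_cons]
    simp only [hc, Bool.false_eq_true, if_false]
    rw [ih (fun hm => h (by simp [hm]))]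
    rfl

theorem bScan_append_nl_of_not_infix {l : List Char} (R : List Char)
    (hocc : ¬ keyC <:+: l) (h : '\n' ∉ l) :
    bScan (l ++ '\n' :: R) = l ++ '\n' :: bScan R := by
  induction l with
  | nil =>
    rw [List.nil_append, bScan_cons]
    have hnp : keyC.isPrefixOf ('\n' :: R) = false := by
      rw [keyC_head]
      simp [List.isPrefixOf]
    simp [hnp]
  | cons c t ih =>
    rw [List.cons_append, bScan_cons]
    have hnp : keyC.isPrefixOf (c :: (t ++ '\n' :: R)) = false := by
      rw [Bool.eq_false_iff]
      intro hp
      have hpre : keyC <+: (c :: t) ++ '\n' :: R := by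
        simpa using List.isPrefixOf_iff_prefix.mp hp
      exact hocc ((prefix_of_append_nl nl_not_mem_keyC hpre).isInfix)
    simp only [hnp, Bool.false_eq_true, if_false]
    rw [ih (fun hi => hocc (hi.trans (List.infix_cons (List.infix_refl t))))
        (fun hm => h (by simp [hm]))]
    rfl

theorem bScan_append_nl_of_infix {l : List Char} (R : List Char)
    (hocc : keyC <:+: l) (h : '\n' ∉ l) :
    bScan (l ++ '\n' :: R) = l ++ '\n' :: bReplNext R := by
  induction l with
  | nil => exact absurd (List.eq_nil_of_infix_nil hocc) keyC_ne_nil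
  | cons c t ih =>
    rw [List.cons_append, bScan_cons]
    by_cases hp : keyC.isPrefixOf (c :: (t ++ '\n' :: R)) = true
    · rw [if_pos hp]
      rw [← List.cons_append, bCopyLine_append_nl R h]
    · rw [if_neg hp]
      have hocc' : keyC <:+: t := by
        rcases List.infix_cons_iff.mp hocc with hpre | hinf
        · exfalso
          apply hp
          apply List.isPrefixOf_iff_prefix.mpr
          have hext : (c :: t) <+: (c :: t) ++ '\n' :: R := List.prefix_append _ _
          simpa using hpre.trans hext
        · exact hinf
      rw [ih hocc' (fun hm => h (by simp [hm]))]
      rfl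

-- indent: A's slice expression is takeWhile isspace
theorem aIndent_eq (l : List Char) : aIndent l = l.takeWhile PySem.Chars.isspace := by
  unfold aIndent
  have h1 := congrArg List.length (List.takeWhile_append_dropWhile (p := PySem.Chars.isspace) (l := l))
  simp only [List.length_append] at h1
  have hld : PySem.Chars.lstrip l = l.dropWhile PySem.Chars.isspace := rfl
  have hnn : (0 : Int) ≤ (l.length : Int) - ((PySem.Chars.lstrip l).length : Int) := by
    have := List.length_dropWhile_le PySem.Chars.isspace l
    rw [hld]; omega
  rw [PySem.List.slice_to l hnn]
  have h2 : ((l.length : Int) - ((PySem.Chars.lstrip l).length : Int)).toNat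
      = (l.takeWhile PySem.Chars.isspace).length := by
    rw [hld]; omega
  rw [h2]
  exact (List.prefix_iff_eq_take.mp (List.takeWhile_prefix _)).symm

-- takeWhile/dropWhile across the '\n' boundary
theorem takeWhile_wsP_eq {n : List Char} (h : '\n' ∉ n) :
    n.takeWhile wsP = n.takeWhile PySem.Chars.isspace := by
  induction n with
  | nil => rfl
  | cons c t ih =>
    have hc : (c == '\n') = false := by
      simp only [beq_eq_false_iff_ne, ne_eq]
      intro he; exact h (by simp [he])
    simp only [List.takeWhile_cons, wsP, hc, Bool.not_false, Bool.and_true]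
    by_cases hs : PySem.Chars.isspace c
    · simp only [hs, if_true]
      rw [ih (fun hm => h (by simp [hm]))]
    · simp [hs]

theorem takeWhile_wsP_append {n : List Char} (J : List Char) (h : '\n' ∉ n) :
    (n ++ '\n' :: J).takeWhile wsP = n.takeWhile wsP := by
  induction n with
  | nil => simp [wsP]
  | cons c t ih =>
    simp only [List.cons_append, List.takeWhile_cons]
    rw [ih (fun hm => h (by simp [hm]))]

theorem dropWhile_not_nl_append {n : List Char} (T : List Char) (h : '\n' ∉ n) :
    (n ++ T).dropWhile (fun c => !(c == '\n')) = T.dropWhile (fun c => !(c == '\n')) := by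
  induction n with
  | nil => rfl
  | cons c t ih =>
    have hc : (c == '\n') = false := by
      simp only [beq_eq_false_iff_ne, ne_eq]
      intro he; exact h (by simp [he])
    simp only [List.cons_append, List.dropWhile_cons, hc, Bool.not_false, if_true]
    exact ih (fun hm => h (by simp [hm]))

-- unfolding equations for aLoop
theorem aLoop_nil : aLoop [] = [] := rfl

theorem aLoop_single (l : List Char) : aLoop [l] = [l] := by
  show (if PySem.Chars.isIn keyC l then l :: ([] : List (List Char)) else l :: aLoop []) = [l]
  split <;> rfl

theorem aLoop_pair (l n : List Char) (rest : List (List Char)) :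
    aLoop (l :: n :: rest) =
      if PySem.Chars.isIn keyC l then l :: (aIndent n ++ strC) :: aLoop rest
      else l :: aLoop (n :: rest) := rfl

-- the head of aLoop (l :: rest) is l
theorem aLoop_cons (l : List Char) (rest : List (List Char)) :
    ∃ t, aLoop (l :: rest) = l :: t := by
  cases rest with
  | nil => exact ⟨[], aLoop_single l⟩
  | cons n rest' =>
    rw [aLoop_pair]
    split
    · exact ⟨_, rfl⟩
    · exact ⟨_, rfl⟩

-- MAIN LEMMA: the scan over the joined string is A's loop over the lines
theorem bScan_join (k : Nat) :
    ∀ (lines : List (List Char)), lines.length ≤ k →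
      (∀ l ∈ lines, '\n' ∉ l) →
      bScan (PySem.Chars.join ['\n'] lines) = PySem.Chars.join ['\n'] (aLoop lines) := by
  induction k with
  | zero =>
    intro lines hlen _
    have h0 : lines = [] := List.length_eq_zero_iff.mp (by omega)
    subst h0
    rw [aLoop_nil, PySem.Chars.join_nil, bScan.eq_def]
  | succ k ih =>
    intro lines hlen hnl
    match lines with
    | [] => rw [aLoop_nil, PySem.Chars.join_nil, bScan.eq_def]
    | [l] =>
      have h := hnl l (by simp)
      rw [PySem.Chars.join_singleton, bScan_no_nl h, aLoop_single,
        PySem.Chars.join_singleton]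
    | l :: n :: rest =>
      have hl : '\n' ∉ l := hnl l (by simp)
      have hn : '\n' ∉ n := hnl n (by simp)
      rw [PySem.Chars.join_cons_cons]
      have hjoin : l ++ ['\n'] ++ PySem.Chars.join ['\n'] (n :: rest)
          = l ++ '\n' :: PySem.Chars.join ['\n'] (n :: rest) := by
        simp
      rw [hjoin]
      by_cases hkey : PySem.Chars.isIn keyC l = true
      · -- the key line: B replaces the next line
        have hinf : keyC <:+: l := (PySem.Chars.isIn_iff_infix keyC l).mp hkey
        rw [aLoop_pair, if_pos hkey]
        cases rest with
        | nil =>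
          rw [PySem.Chars.join_singleton, bScan_append_nl_of_infix _ hinf hl]
          rw [aLoop_nil, PySem.Chars.join_cons_cons, PySem.Chars.join_singleton]
          rw [bReplNext.eq_def, takeWhile_wsP_eq hn]
          rw [List.dropWhile_eq_nil_iff.mpr (fun x hx => by
            simp only [Bool.not_eq_eq_eq_not, Bool.not_true, beq_eq_false_iff_ne, ne_eq]
            intro he; exact hn (he ▸ hx))]
          rw [show bScan [] = [] from by rw [bScan.eq_def], aIndent_eq]
          simp
        | cons r rs =>
          rw [PySem.Chars.join_cons_cons (rest := rs)]
          have hT : n ++ ['\n'] ++ PySem.Chars.join ['\n'] (r :: rs)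
              = n ++ '\n' :: PySem.Chars.join ['\n'] (r :: rs) := by simp
          rw [hT, bScan_append_nl_of_infix _ hinf hl]
          rw [bReplNext.eq_def, takeWhile_wsP_append _ hn, takeWhile_wsP_eq hn,
            dropWhile_not_nl_append _ hn]
          have hdw : ('\n' :: PySem.Chars.join ['\n'] (r :: rs)).dropWhile (fun c => !(c == '\n'))
              = '\n' :: PySem.Chars.join ['\n'] (r :: rs) := by
            simp [List.dropWhile]
          rw [hdw]
          have hscan : bScan ('\n' :: PySem.Chars.join ['\n'] (r :: rs))
              = '\n' :: bScan (PySem.Chars.join ['\n'] (r :: rs)) := by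
            have hni : ¬ keyC <:+: ([] : List Char) :=
              fun hi => keyC_ne_nil (List.eq_nil_of_infix_nil hi)
            simpa using bScan_append_nl_of_not_infix (l := [])
              (PySem.Chars.join ['\n'] (r :: rs)) hni (by simp)
          rw [hscan, ih (r :: rs) (by simp at hlen ⊢; omega)
            (fun x hx => hnl x (by simp at hx ⊢; tauto))]
          rw [aIndent_eq]
          rcases aLoop_cons r rs with ⟨t, ht⟩
          rw [ht]
          simp [PySem.Chars.join_cons_cons]
      · -- not the key line: B copies it
        have hninf : ¬ keyC <:+: l := fun hi =>
          hkey ((PySem.Chars.isIn_iff_infix keyC l).mpr hi)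
        rw [bScan_append_nl_of_not_infix _ hninf hl]
        rw [ih (n :: rest) (by simp at hlen ⊢; omega)
          (fun x hx => hnl x (by simp at hx ⊢; tauto))]
        rw [aLoop_pair, if_neg hkey]
        rcases aLoop_cons n rest with ⟨t, ht⟩
        rw [ht, PySem.Chars.join_cons_cons]
        simp

theorem step1_eq (s : List Char) : aStep1 s = bStep1 s := by
  unfold aStep1 bStep1
  split
  · split
    · rw [splitOn_nl,
        ← bScan_join (pvSplit s).length (pvSplit s) (le_refl _) (pvSplit_no_nl s),
        join_pvSplit]
    · rfl
  · rfl

theorem step2_eq (s : List Char) : aStep2 s = bStep2 s := rfl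

-- ===== VERDICT (by name: the statement is the Claim_ definition above) =====
theorem patch_info_plist_spec : Claim_equal_patch_info_plist := by
  intro content _
  unfold Spec_patch_info_plist patch_info_plist patch_info_plist_alt
  rw [step1_eq, step2_eq]
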